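-- pv_equiv track=rewrite | github.com/hinapyon/MasterResearch | MasterResearchFunction.py | calculate_length_extremes
-- ===== SOURCE A (Python) =====
-- def calculate_length_extremes(trimmed_data_dict):
--     """
--     トリミング済みデータの各ジェスチャラベルにおけるデータ長の最短と最長を計算。
--
--     Parameters:
--     - trimmed_data_dict (dict): トリミング済みジェスチャーデータの辞書
--
--     Returns:
--     - dict: 各nameとlabelに対応する最短・最長長さを格納した辞書
--     """
--     length_extremes = {}
--
--     for name, labels_data in trimmed_data_dict.items():
--         length_extremes[name] = {}
--         for label, data_list in labels_data.items():
--             if data_list:  # データリストが空でない場合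
--                 lengths = [len(data) for data in data_list]
--                 min_length = min(lengths)
--                 max_length = max(lengths)
--                 length_extremes[name][label] = {"min_length": min_length, "max_length": max_length}
--             else:
--                 length_extremes[name][label] = {"min_length": None, "max_length": None}
--
--     return length_extremes
-- ===== SOURCE B (Python) =====
-- def _length_extremes(data_list):
--     if not data_list:
--         return {"min_length": None, "max_length": None}
--     mn = mx = len(data_list[0])
--     for data in data_list[1:]:
--         n = len(data)
--         if n < mn:
--             mn = n
--         if n > mx:
--             mx = n
--     return {"min_length": mn, "max_length": mx}
--
--
-- def calculate_length_extremes(trimmed_data_dict):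
--     return {name: {label: _length_extremes(data_list)
--                    for label, data_list in labels_data.items()}
--             for name, labels_data in trimmed_data_dict.items()}
-- ===== Notes on version B (the rewrite author's own statement) =====
-- stated objective: simpler
-- what changed: Replaces the mutate-a-dict double loop and the intermediate lengths list with min()/max() by a nested dict comprehension whose per-label helper computes running min and max in one pass over data_list.
import Mathlib
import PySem

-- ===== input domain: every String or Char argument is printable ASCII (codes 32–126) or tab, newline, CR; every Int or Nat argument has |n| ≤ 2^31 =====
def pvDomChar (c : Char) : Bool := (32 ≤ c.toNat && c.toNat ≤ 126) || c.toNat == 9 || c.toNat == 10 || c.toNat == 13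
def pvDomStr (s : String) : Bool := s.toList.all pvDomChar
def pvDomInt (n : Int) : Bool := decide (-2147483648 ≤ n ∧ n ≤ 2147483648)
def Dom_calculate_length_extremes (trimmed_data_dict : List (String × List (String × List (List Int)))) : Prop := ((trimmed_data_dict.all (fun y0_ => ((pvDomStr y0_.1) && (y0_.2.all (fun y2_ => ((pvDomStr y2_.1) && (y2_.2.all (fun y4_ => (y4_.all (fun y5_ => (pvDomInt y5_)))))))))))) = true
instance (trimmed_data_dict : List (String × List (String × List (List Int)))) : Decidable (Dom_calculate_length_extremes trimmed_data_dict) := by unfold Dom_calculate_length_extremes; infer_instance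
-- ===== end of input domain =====

-- B replaces the dict-mutating double loop and the per-label lengths list with min()/max()
-- by a nested dict comprehension whose helper keeps a running min and max in a single pass (objective: simpler).

-- ===== PORT A =====
-- the value A stores for one label: lengths list, then min() and max() (min?/max? are some _ on the nonempty branch)
def pvALabel (data_list : List (List Int)) : List (String × Option Int) :=
  if data_list ≠ [] then
    let lengths := data_list.map (fun data => (data.length : Int))
    [("min_length", PySem.List.min? lengths (fun x => x)),
     ("max_length", PySem.List.max? lengths (fun x => x))]
  else
    [("min_length", (none : Option Int)), ("max_length", none)]

-- the inner loop: length_extremes[name] starts as {} and gets one entry per label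
def pvAInner (labels_data : List (String × List (List Int))) : List (String × List (String × Option Int)) :=
  (labels_data.foldl (fun inner ld => inner.insert ld.1 (pvALabel ld.2))
    (PySem.Dict.empty : PySem.Dict String (List (String × Option Int)))).items

def calculate_length_extremes (trimmed_data_dict : List (String × List (String × List (List Int)))) : List (String × List (String × List (String × Option Int))) :=
  (trimmed_data_dict.foldl (fun length_extremes nl => length_extremes.insert nl.1 (pvAInner nl.2))
    (PySem.Dict.empty : PySem.Dict String (List (String × List (String × Option Int))))).items

-- ===== PORT B =====
def pvLengthExtremes (data_list : List (List Int)) : List (String × Option Int) :=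
  match data_list with
  | [] => [("min_length", none), ("max_length", none)]
  | data :: rest =>
    let n0 : Int := data.length
    let mm := rest.foldl (fun (p : Int × Int) data =>
        let n : Int := data.length
        (if n < p.1 then n else p.1, if n > p.2 then n else p.2)) (n0, n0)
    [("min_length", some mm.1), ("max_length", some mm.2)]

def calculate_length_extremes_alt (trimmed_data_dict : List (String × List (String × List (List Int)))) : List (String × List (String × List (String × Option Int))) :=
  trimmed_data_dict.map (fun nl => (nl.1, nl.2.map (fun ld => (ld.1, pvLengthExtremes ld.2))))

-- ===== PRECONDITION & SPEC =====
-- Pre_ excludes association lists with duplicate name keys or duplicate label keys: a Python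
-- dict cannot hold duplicates (its constructor merges them), so such lists represent no input of A.
def Pre_calculate_length_extremes (trimmed_data_dict : List (String × List (String × List (List Int)))) : Prop :=
  (trimmed_data_dict.map (fun nl => nl.1)).Nodup ∧
  ∀ nl ∈ trimmed_data_dict, (nl.2.map (fun ld => ld.1)).Nodup
instance (trimmed_data_dict : List (String × List (String × List (List Int)))) : Decidable (Pre_calculate_length_extremes trimmed_data_dict) := by unfold Pre_calculate_length_extremes; infer_instance

def pvWitness_calculate_length_extremes : (List (String × List (String × List (List Int)))) :=
  [("n1", [("l1", [[1], [2, 3], [0, 0, 0]]), ("l2", [])]), ("n2", [])]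

def Spec_calculate_length_extremes (trimmed_data_dict : List (String × List (String × List (List Int)))) (out : List (String × List (String × List (String × Option Int)))) : Prop := out = calculate_length_extremes_alt trimmed_data_dict
instance (trimmed_data_dict : List (String × List (String × List (List Int)))) (out : List (String × List (String × List (String × Option Int)))) : Decidable (Spec_calculate_length_extremes trimmed_data_dict out) := by
  unfold Spec_calculate_length_extremes
  letI h2 : DecidableEq (List (String × List (String × Option Int))) := instDecidableEqList
  letI h4 : DecidableEq (List (String × List (String × List (String × Option Int)))) := instDecidableEqList
  exact h4 out _

-- ===== CLAIM (what is proved, stated in full; the proofs are below) =====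
def Claim_equal_calculate_length_extremes : Prop := ∀ (trimmed_data_dict : List (String × List (String × List (List Int)))), Dom_calculate_length_extremes trimmed_data_dict → Pre_calculate_length_extremes trimmed_data_dict → Spec_calculate_length_extremes trimmed_data_dict (calculate_length_extremes trimmed_data_dict)

-- ===== LEMMAS AND PROOFS =====

-- B's single accumulator pair computes the running min and max of the element lengths
theorem pv_fold_pair_eq (rest : List (List Int)) (a b : Int) :
    rest.foldl (fun (p : Int × Int) data =>
        let n : Int := data.length
        (if n < p.1 then n else p.1, if n > p.2 then n else p.2)) (a, b)
      = ((rest.map (fun data => (data.length : Int))).foldl min a,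
         (rest.map (fun data => (data.length : Int))).foldl max b) := by
  induction rest generalizing a b with
  | nil => rfl
  | cons d t ih =>
      have h1 : (if (d.length : Int) < a then (d.length : Int) else a) = min a d.length := by
        rw [min_def]; split_ifs <;> omega
      have h2 : (if (d.length : Int) > b then (d.length : Int) else b) = max b d.length := by
        rw [max_def]; split_ifs <;> omega
      simp only [List.foldl_cons, List.map_cons, ih, h1, h2]

-- the per-label value A stores equals B's helper
theorem pv_label_eq (data_list : List (List Int)) :
    pvALabel data_list = pvLengthExtremes data_list := by
  cases data_list with
  | nil => rfl
  | cons d rest =>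
      simp only [pvALabel, ne_eq, reduceCtorEq, not_false_iff, if_true, List.map_cons,
        PySem.List.min?_id_cons, PySem.List.max?_id_cons, pvLengthExtremes,
        pv_fold_pair_eq]

-- on distinct labels the inner insert loop's items are exactly the per-label map
theorem pv_inner_eq (labels_data : List (String × List (List Int)))
    (h : (labels_data.map (fun ld => ld.1)).Nodup) :
    pvAInner labels_data = labels_data.map (fun ld => (ld.1, pvLengthExtremes ld.2)) := by
  unfold pvAInner
  rw [PySem.Dict.items_foldl_insert_fresh labels_data (fun ld => ld.1) (fun ld => pvALabel ld.2)
        PySem.Dict.empty (fun a _ => rfl) h]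
  simp only [pv_label_eq]
  rfl

theorem calculate_length_extremes_spec : Claim_equal_calculate_length_extremes := by
  intro tdd _ hpre
  obtain ⟨houter, hinner⟩ := hpre
  unfold Spec_calculate_length_extremes calculate_length_extremes calculate_length_extremes_alt
  rw [PySem.Dict.items_foldl_insert_fresh tdd (fun nl => nl.1) (fun nl => pvAInner nl.2)
        PySem.Dict.empty (fun a _ => rfl) houter]
  exact List.map_congr_left (fun nl hnl => congrArg _ (pv_inner_eq nl.2 (hinner nl hnl)))
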